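-- pv_equiv track=rewrite | github.com/anpl-code/Deblank | src/formatter/formatter_py.py | process_indentation_error
-- ===== SOURCE A (Python) =====
-- def process_indentation_error(code,lineno,offset,repair_info):
--     code_lines=code.splitlines()
--     if(lineno==len(code_lines) and code_lines[-1].rstrip()[-1]==':'):#empty control structure at the end of file
--         code_lines[-1]+=' "[EMPTY_CONTROL_PLACEHOLDER]"'
--         repair_info["empty_control"]=True
--         return "\n".join(code_lines)
--     #find the previous non-empty line
--     for i in range(lineno-2,-1,-1):
--         if(code_lines[i].strip() and not code_lines[i].strip().startswith("#")):
--             if(code_lines[i].rstrip().endswith(":")):#empty control structure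
--                 code_lines[i]+=' "[EMPTY_CONTROL_PLACEHOLDER]"'
--                 repair_info["empty_control"]=True
--                 break
--             else:
--                 #add indentation to the current line
--                 prev_indent_len=len(code_lines[i])-len(code_lines[i].lstrip())
--                 cur_indent_len=len(code_lines[lineno-1])-len(code_lines[lineno-1].lstrip())
--                 if(prev_indent_len<=cur_indent_len):
--                     indent_len=prev_indent_len
--                 else:
--                     #find the nearest previous line with less indentation
--                     for j in range(i-1,-1,-1):
--                         if(code_lines[j].strip() and not code_lines[j].strip().startswith("#")):
--                             indent_len=len(code_lines[j])-len(code_lines[j].lstrip())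
--                             if(indent_len<cur_indent_len):
--                                 break
--                 code_lines[lineno-1]=' '*indent_len+code_lines[lineno-1].lstrip()
--                 break
--     return "\n".join(code_lines)
-- ===== SOURCE B (Python) =====
-- def process_indentation_error(code, lineno, offset, repair_info):
--     lines = code.splitlines()
--     n = len(lines)
--     if lineno == n and lines and lines[-1].rstrip().endswith(':'):
--         # empty control structure at the end of file
--         repair_info["empty_control"] = True
--         return "\n".join(lines[:-1] + [lines[-1] + ' "[EMPTY_CONTROL_PLACEHOLDER]"'])
--     m = max(lineno - 1, 0)
--     # one pass: index of the meaningful lines before the bad line, with their indents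
--     idx = [(k, len(l) - len(l.lstrip()))
--            for k, l in enumerate(lines[:m])
--            if l.strip() and not l.strip().startswith('#')]
--     if not idx:
--         return "\n".join(lines)
--     i, prev_indent = idx[-1]
--     if lines[i].rstrip().endswith(':'):
--         # empty control structure
--         repair_info["empty_control"] = True
--         return "\n".join(lines[:i] + [lines[i] + ' "[EMPTY_CONTROL_PLACEHOLDER]"'] + lines[i + 1:])
--     cur_line = lines[lineno - 1]
--     cur_indent = len(cur_line) - len(cur_line.lstrip())
--     if prev_indent <= cur_indent:
--         indent = prev_indent
--     else:
--         indent = next((ind for _, ind in reversed(idx[:-1]) if ind < cur_indent),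
--                       idx[0][1])
--     return "\n".join(lines[:lineno - 1] + [' ' * indent + cur_line.lstrip()] + lines[lineno:])
-- ===== Notes on version B (the rewrite author's own statement) =====
-- stated objective: alternative
-- what changed: B builds, in one forward pass, an index of the meaningful lines (position, indent) before the bad line, then reads the repair off that index (last entry = previous meaningful line; a reverse find over the earlier entries with the earliest entry as fallback), instead of A's backward outer scan with a nested backward inner scan.
import Mathlib
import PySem

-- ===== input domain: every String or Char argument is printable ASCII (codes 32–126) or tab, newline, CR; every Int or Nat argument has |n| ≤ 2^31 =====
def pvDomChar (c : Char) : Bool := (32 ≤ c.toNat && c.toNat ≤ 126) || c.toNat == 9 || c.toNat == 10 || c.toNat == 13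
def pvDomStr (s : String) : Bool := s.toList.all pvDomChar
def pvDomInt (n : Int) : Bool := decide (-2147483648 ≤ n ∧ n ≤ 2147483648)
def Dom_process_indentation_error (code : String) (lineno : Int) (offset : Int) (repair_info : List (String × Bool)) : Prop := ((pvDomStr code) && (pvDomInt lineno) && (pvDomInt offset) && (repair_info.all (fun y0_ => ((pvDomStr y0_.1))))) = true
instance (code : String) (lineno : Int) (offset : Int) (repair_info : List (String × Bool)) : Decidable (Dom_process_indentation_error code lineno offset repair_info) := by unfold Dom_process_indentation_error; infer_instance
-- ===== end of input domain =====

-- B replaces A's nested backward scans by one index of the meaningful lines built in a single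
-- pass (objective: alternative decomposition, same cost). Equivalence is about the RETURN
-- value only: both Pythons also set repair_info["empty_control"] in place, in the same cases.

-- ===== PORT A =====
-- shared string helpers (each is one Python expression both sources use verbatim)
def pvMeaningful (s : String) : Bool :=
  (PySem.Str.strip s != "") && !(PySem.Str.startswith (PySem.Str.strip s) "#")

def pvIndent (s : String) : Int := PySem.Str.len s - PySem.Str.len (PySem.Str.lstrip s)

def pvSpaces (n : Int) : String := String.ofList (List.replicate n.toNat ' ')  -- ' ' * n

def pvPlaceholder : String := " \"[EMPTY_CONTROL_PLACEHOLDER]\""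

-- A's inner loop `for j in range(i-1,-1,-1)`; counter j+1 visits index j; acc = the last
-- value assigned to indent_len (none = still unbound: Python's NameError case, excluded by
-- Pre_ — the `.getD 0` in pvLoopA below is never reached on admitted inputs).
def pvInnerA (L : List String) (cur : Int) : Nat → Option Int → Option Int
  | 0, acc => acc
  | j + 1, acc =>
    let s := L.getD j ""   -- code_lines[j]; in range whenever reached on admitted inputs
    if pvMeaningful s then
      let ind := pvIndent s
      if ind < cur then some ind else pvInnerA L cur j (some ind)
    else pvInnerA L cur j acc

-- A's outer loop `for i in range(lineno-2,-1,-1)`; counter k+1 visits index k; breaks return.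
def pvLoopA (L : List String) (c : Nat) : Nat → List String
  | 0 => L
  | k + 1 =>
    let s := L.getD k ""   -- code_lines[i]; in range whenever reached on admitted inputs
    if pvMeaningful s then
      if PySem.Str.endswith (PySem.Str.rstrip s) ":" then
        L.set k (s ++ pvPlaceholder)
      else
        let curLine := L.getD c ""   -- code_lines[lineno-1]; in range on admitted inputs
        let cur := pvIndent curLine
        let ind := if pvIndent s ≤ cur then pvIndent s else (pvInnerA L cur k none).getD 0
        L.set c (pvSpaces ind ++ PySem.Str.lstrip curLine)
    else pvLoopA L c k

def process_indentation_error (code : String) (lineno : Int) (offset : Int) (repair_info : List (String × Bool)) : String :=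
  let L := PySem.Str.splitlines code
  let n : Int := (L.length : Int)
  -- code_lines[-1].rstrip()[-1] == ':' — each pyGet? is none exactly where Python raises
  -- IndexError (empty code / blank last line); those inputs are outside Pre_
  if lineno = n ∧ PySem.Str.pyGet? (PySem.Str.rstrip ((PySem.List.pyGet? L (-1)).getD "")) (-1) = some ':' then
    PySem.Str.join "\n" (PySem.List.pySetD L (-1) (((PySem.List.pyGet? L (-1)).getD "") ++ pvPlaceholder))
  else
    PySem.Str.join "\n" (pvLoopA L (lineno - 1).toNat (lineno - 1).toNat)

-- ===== PORT B =====
-- the one-pass index: [(k, indent(l)) for k, l in enumerate(lines[:m]) if meaningful(l)]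
def pvIdxB (L : List String) (m : Int) : List (Int × Int) :=
  ((PySem.List.enumerate (PySem.List.slice L none (some m))).filter (fun p => pvMeaningful p.2)).map
    (fun p => (p.1, pvIndent p.2))

def process_indentation_error_alt (code : String) (lineno : Int) (offset : Int) (repair_info : List (String × Bool)) : String :=
  let L := PySem.Str.splitlines code
  let n : Int := (L.length : Int)
  if lineno = n ∧ L ≠ [] ∧ PySem.Str.endswith (PySem.Str.rstrip (L.getLastD "")) ":" = true then
    PySem.Str.join "\n" (PySem.List.slice L none (some (-1)) ++ [L.getLastD "" ++ pvPlaceholder])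
  else
    let m : Int := max (lineno - 1) 0
    let idx := pvIdxB L m
    match idx.getLast? with
    | none => PySem.Str.join "\n" L
    | some (i, prevInd) =>
      let s := PySem.List.pyGetD L i ""   -- lines[i], i comes from enumerate: in range
      if PySem.Str.endswith (PySem.Str.rstrip s) ":" then
        PySem.Str.join "\n" (PySem.List.slice L none (some i) ++ [s ++ pvPlaceholder] ++ PySem.List.slice L (some (i + 1)) none)
      else
        let curLine := PySem.List.pyGetD L (lineno - 1) ""   -- lines[lineno-1]; in range on admitted inputs
        let cur := pvIndent curLine
        let ind := if prevInd ≤ cur then prevInd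
                   else match idx.dropLast.reverse.find? (fun q => decide (q.2 < cur)) with
                        | some q => q.2
                        | none => (idx.headD (0, 0)).2
        PySem.Str.join "\n" (PySem.List.slice L none (some (lineno - 1)) ++ [pvSpaces ind ++ PySem.Str.lstrip curLine] ++ PySem.List.slice L (some lineno) none)

-- ===== PRECONDITION & SPEC =====
-- Pre_ excludes exactly the inputs on which the Python A raises: IndexError in the end-of-file
-- guard (empty code, or blank last line, when lineno == len(lines)), IndexError from a lineno
-- beyond len(lines)+1 (or equal to len(lines)+1 while the nearest meaningful earlier line does
-- not end in ':'), and the NameError when the sole meaningful earlier line is more indented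
-- than the bad line (indent_len is then never assigned).
def Pre_process_indentation_error (code : String) (lineno : Int) (offset : Int) (repair_info : List (String × Bool)) : Prop :=
  let L := PySem.Str.splitlines code
  let n : Int := (L.length : Int)
  let r := PySem.Str.rstrip (L.getLastD "")
  (lineno = n → L ≠ [] ∧ r ≠ "") ∧
  ((lineno = n ∧ PySem.Str.endswith r ":" = true) ∨
   (lineno ≤ n + 1 ∧
    ∀ p ∈ (pvIdxB L (max (lineno - 1) 0)).getLast?,
      PySem.Str.endswith (PySem.Str.rstrip (PySem.List.pyGetD L p.1 "")) ":" = true ∨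
      (lineno ≤ n ∧ (pvIndent (PySem.List.pyGetD L (lineno - 1) "") < p.2 →
        2 ≤ (pvIdxB L (max (lineno - 1) 0)).length))))

instance (code : String) (lineno : Int) (offset : Int) (repair_info : List (String × Bool)) : Decidable (Pre_process_indentation_error code lineno offset repair_info) := by unfold Pre_process_indentation_error; infer_instance

def pvWitness_process_indentation_error : String × Int × Int × (List (String × Bool)) :=
  ("if a:\n  pass\nx", 3, 0, [])

def Spec_process_indentation_error (code : String) (lineno : Int) (offset : Int) (repair_info : List (String × Bool)) (out : String) : Prop := out = process_indentation_error_alt code lineno offset repair_info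
instance (code : String) (lineno : Int) (offset : Int) (repair_info : List (String × Bool)) (out : String) : Decidable (Spec_process_indentation_error code lineno offset repair_info out) := by unfold Spec_process_indentation_error; infer_instance

-- ===== CLAIM (what is proved, stated in full; the proofs are below) =====
def Claim_equal_process_indentation_error : Prop := ∀ (code : String) (lineno : Int) (offset : Int) (repair_info : List (String × Bool)), Dom_process_indentation_error code lineno offset repair_info → Pre_process_indentation_error code lineno offset repair_info → Spec_process_indentation_error code lineno offset repair_info (process_indentation_error code lineno offset repair_info)

-- ===== LEMMAS AND PROOFS =====

-- the index list at a Nat bound (pvIdxB is only ever used at the nonnegative bound max (lineno-1) 0)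
def pvIdx (L : List String) (m : Nat) : List (Int × Int) := pvIdxB L (m : Int)

lemma pvIdx_step (L : List String) (m : Nat) :
    pvIdx L (m + 1) =
      pvIdx L m ++ (if pvMeaningful (L.getD m "") then [((m : Int), pvIndent (L.getD m ""))] else []) := by
  unfold pvIdx pvIdxB
  rw [PySem.List.slice_to_natCast, PySem.List.slice_to_natCast, List.take_add_one]
  by_cases hm : m < L.length
  · rw [List.getElem?_eq_getElem hm]
    have hget : L.getD m "" = L[m] := by
      rw [List.getD_eq_getElem?_getD, List.getElem?_eq_getElem hm]; rfl
    have hlen : (List.take m L).length = m := by simp [Nat.min_eq_left (Nat.le_of_lt hm)]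
    rw [Option.toList_some, PySem.List.enumerate_append, List.filter_append, List.map_append, hlen, hget]
    congr 1
    by_cases hmf : pvMeaningful L[m]
    · simp [PySem.List.enumerate_cons, PySem.List.enumerate_nil, hmf]
    · simp [PySem.List.enumerate_cons, PySem.List.enumerate_nil, hmf]
  · rw [List.getElem?_eq_none (by omega)]
    have hget : L.getD m "" = "" := by
      rw [List.getD_eq_getElem?_getD, List.getElem?_eq_none (by omega)]; rfl
    rw [hget]
    have hmf : pvMeaningful "" = false := by decide
    simp [hmf]

lemma pvIdx_mem (L : List String) (m : Nat) (p : Int × Int) (hp : p ∈ pvIdx L m) :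
    ∃ k : Nat, k < m ∧ k < L.length ∧ p = ((k : Int), pvIndent (L.getD k "")) ∧
      pvMeaningful (L.getD k "") = true := by
  unfold pvIdx pvIdxB at hp
  rw [PySem.List.slice_to_natCast] at hp
  simp only [List.mem_map, List.mem_filter] at hp
  obtain ⟨q, ⟨hq, hmf⟩, rfl⟩ := hp
  rw [PySem.List.mem_enumerate_iff] at hq
  obtain ⟨k, hk, rfl⟩ := hq
  have hk' : k < m ∧ k < L.length := by simpa using hk
  have hkm : k < m := hk'.1
  have hkl : k < L.length := hk'.2
  have hget : (List.take m L)[k] = L.getD k "" := by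
    rw [List.getElem_take, List.getD_eq_getElem?_getD, List.getElem?_eq_getElem hkl]; rfl
  refine ⟨k, hkm, hkl, ?_, ?_⟩
  · simp [hget]
  · rwa [hget] at hmf

-- A's inner loop, characterised by the index list
lemma pvInner_eq (L : List String) (cur : Int) (j : Nat) (acc : Option Int) :
    pvInnerA L cur j acc =
      match (pvIdx L j).reverse.find? (fun q => decide (q.2 < cur)) with
      | some q => some q.2
      | none => match pvIdx L j with
                | [] => acc
                | q :: _ => some q.2 := by
  induction j generalizing acc with
  | zero =>
    have h0 : pvIdx L 0 = [] := by
      unfold pvIdx pvIdxB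
      rw [PySem.List.slice_to_natCast]
      simp
    rw [h0]
    rfl
  | succ j ih =>
    rw [pvIdx_step]
    show (if pvMeaningful (L.getD j "") then
            if pvIndent (L.getD j "") < cur then some (pvIndent (L.getD j ""))
            else pvInnerA L cur j (some (pvIndent (L.getD j "")))
          else pvInnerA L cur j acc) = _
    by_cases hmf : pvMeaningful (L.getD j "")
    · rw [if_pos hmf, if_pos hmf]
      rw [List.reverse_append, List.reverse_singleton, List.singleton_append, List.find?_cons]
      by_cases hlt : pvIndent (L.getD j "") < cur
      · rw [if_pos hlt]
        simp only [hlt, decide_true]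
      · rw [if_neg hlt]
        simp only [hlt, decide_false]
        rw [ih]
        cases hfind : (pvIdx L j).reverse.find? (fun q => decide (q.2 < cur)) with
        | some q => rfl
        | none =>
          cases hidx : pvIdx L j with
          | nil => simp
          | cons q t => simp
    · rw [if_neg hmf, if_neg hmf]
      simp only [List.append_nil]
      exact ih acc

-- what B's match computes, in the set-at-an-index form A produces
def pvTailList (L : List String) (c : Nat) (idx : List (Int × Int)) : List String :=
  match idx.getLast? with
  | none => L
  | some (i, p) =>
    let s := L.getD i.toNat ""
    if PySem.Str.endswith (PySem.Str.rstrip s) ":" then L.set i.toNat (s ++ pvPlaceholder)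
    else
      let curLine := L.getD c ""
      let cur := pvIndent curLine
      let ind := if p ≤ cur then p
                 else match idx.dropLast.reverse.find? (fun q => decide (q.2 < cur)) with
                      | some q => q.2
                      | none => (idx.headD (0, 0)).2
      L.set c (pvSpaces ind ++ PySem.Str.lstrip curLine)

-- A's outer loop equals B's match over the index, given Pre_'s guarantee about the last entry
lemma pvLoop_eq (L : List String) (c : Nat) (m : Nat)
    (H : ∀ i p, (pvIdx L m).getLast? = some (i, p) →
      PySem.Str.endswith (PySem.Str.rstrip (L.getD i.toNat "")) ":" = true ∨
      (pvIndent (L.getD c "") < p → 2 ≤ (pvIdx L m).length)) :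
    pvLoopA L c m = pvTailList L c (pvIdx L m) := by
  induction m with
  | zero =>
    have h0 : pvIdx L 0 = [] := by
      unfold pvIdx pvIdxB
      rw [PySem.List.slice_to_natCast]
      simp
    rw [h0]
    rfl
  | succ m ih =>
    rw [pvIdx_step]
    by_cases hmf : pvMeaningful (L.getD m "")
    · rw [if_pos hmf]
      rw [pvIdx_step, if_pos hmf] at H
      have hstep : pvLoopA L c (m + 1) =
          (if PySem.Str.endswith (PySem.Str.rstrip (L.getD m "")) ":" then L.set m (L.getD m "" ++ pvPlaceholder)
           else
             let curLine := L.getD c ""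
             let cur := pvIndent curLine
             let ind := if pvIndent (L.getD m "") ≤ cur then pvIndent (L.getD m "")
                        else (pvInnerA L cur m none).getD 0
             L.set c (pvSpaces ind ++ PySem.Str.lstrip curLine)) := by
        rw [pvLoopA, if_pos hmf]
      rw [hstep]
      set s := L.getD m "" with hs
      unfold pvTailList
      rw [List.getLast?_concat]
      simp only [Int.toNat_natCast, ← hs]
      by_cases hco : PySem.Str.endswith (PySem.Str.rstrip s) ":" = true
      · rw [if_pos hco, if_pos hco]
      · rw [if_neg hco, if_neg hco]
        set cur := pvIndent (L.getD c "") with hcur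
        by_cases hle : pvIndent s ≤ cur
        · rw [if_pos hle, if_pos hle]
        · rw [if_neg hle, if_neg hle]
          rw [List.dropLast_concat]
          rw [pvInner_eq]
          cases hfind : (pvIdx L m).reverse.find? (fun q => decide (q.2 < cur)) with
          | some q => rfl
          | none =>
            cases hidx : pvIdx L m with
            | cons q t => simp
            | nil =>
              exfalso
              have := H (m : Int) (pvIndent s) (by rw [List.getLast?_concat])
              rcases this with h | h
              · rw [Int.toNat_natCast, ← hs] at h; exact hco h
              · have h2 := h (by omega)
                rw [hidx] at h2
                simp at h2
    · rw [if_neg hmf]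
      simp only [List.append_nil]
      have hstep : pvLoopA L c (m + 1) = pvLoopA L c m := by rw [pvLoopA, if_neg hmf]
      rw [hstep]
      have heq : pvIdx L (m + 1) = pvIdx L m := by
        rw [pvIdx_step, if_neg hmf, List.append_nil]
      apply ih
      intro i p hip
      have hH := H i p (by rw [heq]; exact hip)
      rwa [heq] at hH

-- code_lines[-1] += x on a nonempty list
lemma pySetD_neg_one (L : List String) (v : String) (h : L ≠ []) :
    PySem.List.pySetD L (-1) v = L.dropLast ++ [v] := by
  unfold PySem.List.pySetD PySem.List.pySet? PySem.List.pyIdx?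
  have hl : 0 < L.length := List.length_pos_iff.mpr h
  simp only [show ¬((0:Int) ≤ -1) by norm_num, if_false]
  rw [if_pos (by omega)]
  simp only [Option.map_some, Option.getD_some]
  rw [List.set_eq_take_append_cons_drop, if_pos (by omega)]
  have h2 : L.length - (-(-1:Int)).toNat = L.length - 1 := by omega
  have h3 : L.length - 1 + 1 = L.length := by omega
  rw [h2, h3, List.dropLast_eq_take, List.drop_length]

-- B's slice-rebuild of the lines equals A's in-place assignment
lemma set_eq_slices (L : List String) (k : Nat) (x : String) (hk : k < L.length) :
    PySem.List.slice L none (some (k : Int)) ++ [x] ++ PySem.List.slice L (some ((k : Int) + 1)) none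
      = L.set k x := by
  rw [show ((k : Int) + 1) = ((k + 1 : Nat) : Int) by push_cast; ring]
  rw [PySem.List.slice_to_natCast, PySem.List.slice_from_natCast,
      List.set_eq_take_append_cons_drop, if_pos hk]
  simp

-- the end-of-file guard: A's last-character test and B's endswith test agree
lemma guard_iff (r : String) :
    PySem.Str.pyGet? r (-1) = some ':' ↔ PySem.Str.endswith r ":" = true := by
  rw [PySem.Str.pyGet?_eq, PySem.Chars.pyGet?_eq_listPyGet?, PySem.List.pyGet?_neg_one,
      PySem.Str.endswith_eq]
  rw [show (":" : String).toList = [':'] from rfl]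
  rw [PySem.Chars.endswith_iff, List.getLast?_eq_some_iff]
  constructor
  · rintro ⟨ys, h⟩; exact ⟨ys, h.symm⟩
  · rintro ⟨ys, h⟩; exact ⟨ys, h.symm⟩

-- on the non-guard path, A's loop equals B's index-driven rewrite
lemma loop_eq_alt (L : List String) (lineno : Int)
    (hlast : ∀ p ∈ (pvIdxB L (max (lineno - 1) 0)).getLast?,
      PySem.Str.endswith (PySem.Str.rstrip (PySem.List.pyGetD L p.1 "")) ":" = true ∨
      (lineno ≤ (L.length : Int) ∧ (pvIndent (PySem.List.pyGetD L (lineno - 1) "") < p.2 →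
        2 ≤ (pvIdxB L (max (lineno - 1) 0)).length))) :
    PySem.Str.join "\n" (pvLoopA L (lineno - 1).toNat (lineno - 1).toNat) =
      (let m : Int := max (lineno - 1) 0
       let idx := pvIdxB L m
       match idx.getLast? with
       | none => PySem.Str.join "\n" L
       | some (i, prevInd) =>
         let s := PySem.List.pyGetD L i ""
         if PySem.Str.endswith (PySem.Str.rstrip s) ":" then
           PySem.Str.join "\n" (PySem.List.slice L none (some i) ++ [s ++ pvPlaceholder] ++ PySem.List.slice L (some (i + 1)) none)
         else
           let curLine := PySem.List.pyGetD L (lineno - 1) ""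
           let cur := pvIndent curLine
           let ind := if prevInd ≤ cur then prevInd
                      else match idx.dropLast.reverse.find? (fun q => decide (q.2 < cur)) with
                           | some q => q.2
                           | none => (idx.headD (0, 0)).2
           PySem.Str.join "\n" (PySem.List.slice L none (some (lineno - 1)) ++ [pvSpaces ind ++ PySem.Str.lstrip curLine] ++ PySem.List.slice L (some lineno) none)) := by
  set c := (lineno - 1).toNat with hc
  have hidxB : pvIdxB L (max (lineno - 1) 0) = pvIdx L c := by
    unfold pvIdx; rw [hc, Int.toNat_eq_max]
  have H : ∀ i p, (pvIdx L c).getLast? = some (i, p) →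
      PySem.Str.endswith (PySem.Str.rstrip (L.getD i.toNat "")) ":" = true ∨
      (pvIndent (L.getD c "") < p → 2 ≤ (pvIdx L c).length) := by
    intro i p hip
    obtain ⟨k, hkc, hkl, hpk, hmf⟩ := pvIdx_mem L c _ (List.mem_of_getLast? hip)
    have hi : i = (k : Int) := by rw [Prod.ext_iff] at hpk; exact hpk.1
    have hc1 : lineno - 1 = (c : Int) := by omega
    have hlast' := hlast (i, p) (by rw [hidxB]; exact hip)
    rcases hlast' with hco | ⟨hn, himp⟩
    · left
      rw [hi, PySem.List.pyGetD_natCast] at hco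
      rw [hi, Int.toNat_natCast]
      exact hco
    · right
      intro hlt
      rw [← hidxB]
      apply himp
      rwa [hc1, PySem.List.pyGetD_natCast]
  rw [pvLoop_eq L c c H]
  simp only [hidxB]
  cases hlp : (pvIdx L c).getLast? with
  | none => unfold pvTailList; rw [hlp]
  | some ip =>
    obtain ⟨i, p⟩ := ip
    obtain ⟨k, hkc, hkl, hpk, hmf⟩ := pvIdx_mem L c _ (List.mem_of_getLast? hlp)
    have hi : i = (k : Int) := (Prod.ext_iff.mp hpk).1
    have hc1 : lineno - 1 = (c : Int) := by omega
    unfold pvTailList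
    rw [hlp]
    dsimp only
    subst hi
    rw [Int.toNat_natCast, PySem.List.pyGetD_natCast]
    by_cases hco : PySem.Str.endswith (PySem.Str.rstrip (L.getD k "")) ":" = true
    · rw [if_pos hco, if_pos hco, set_eq_slices L k _ hkl]
    · rw [if_neg hco, if_neg hco]
      have hlast' := hlast ((k : Int), p) (by rw [hidxB]; exact hlp)
      have hn : lineno ≤ (L.length : Int) := by
        rcases hlast' with h | ⟨hn, _⟩
        · rw [PySem.List.pyGetD_natCast] at h; exact absurd h hco
        · exact hn
      have hcl : c < L.length := by omega
      rw [hc1, PySem.List.pyGetD_natCast]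
      rw [show lineno = (c : Int) + 1 by omega]
      rw [set_eq_slices L c _ hcl]

-- ===== VERDICT (by name: the statement is the Claim_ definition above) =====
theorem process_indentation_error_spec : Claim_equal_process_indentation_error := by
  intro code lineno offset repair_info _hDom hPre
  unfold Spec_process_indentation_error
  obtain ⟨h1, h2⟩ := hPre
  simp only [process_indentation_error, process_indentation_error_alt]
  set L := PySem.Str.splitlines code with hL
  have hgetneg : (PySem.List.pyGet? L (-1)).getD "" = L.getLastD "" := by
    rw [PySem.List.pyGet?_neg_one, List.getLastD_eq_getLast?]
  by_cases hn : lineno = (L.length : Int)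
  · obtain ⟨hne, hrne⟩ := h1 hn
    by_cases hcol : PySem.Str.endswith (PySem.Str.rstrip (L.getLastD "")) ":" = true
    · rw [if_pos ⟨hn, by rw [hgetneg]; exact (guard_iff _).mpr hcol⟩, if_pos ⟨hn, hne, hcol⟩]
      rw [hgetneg, pySetD_neg_one L _ hne, PySem.List.slice_to_neg_one]
    · have hga : ¬(lineno = (L.length : Int) ∧
          PySem.Str.pyGet? (PySem.Str.rstrip ((PySem.List.pyGet? L (-1)).getD "")) (-1) = some ':') := by
        rintro ⟨-, h⟩
        rw [hgetneg] at h
        exact hcol ((guard_iff _).mp h)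
      have hgb : ¬(lineno = (L.length : Int) ∧ L ≠ [] ∧
          PySem.Str.endswith (PySem.Str.rstrip (L.getLastD "")) ":" = true) := by
        rintro ⟨-, -, h⟩; exact hcol h
      rw [if_neg hga, if_neg hgb]
      rcases h2 with ⟨-, hcol'⟩ | ⟨-, hlast⟩
      · exact absurd hcol' hcol
      · exact loop_eq_alt L lineno hlast
  · have hga : ¬(lineno = (L.length : Int) ∧
        PySem.Str.pyGet? (PySem.Str.rstrip ((PySem.List.pyGet? L (-1)).getD "")) (-1) = some ':') := by
      rintro ⟨h, -⟩; exact hn h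
    have hgb : ¬(lineno = (L.length : Int) ∧ L ≠ [] ∧
        PySem.Str.endswith (PySem.Str.rstrip (L.getLastD "")) ":" = true) := by
      rintro ⟨h, -⟩; exact hn h
    rw [if_neg hga, if_neg hgb]
    rcases h2 with ⟨h, -⟩ | ⟨-, hlast⟩
    · exact absurd h hn
    · exact loop_eq_alt L lineno hlast
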